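-- pv_equiv track=rewrite | github.com/vntanh1406/Graph_SUM2025 | FinalProject/1_IntegerPartition/Baitoan3/ConjAndOdd.py | is_self_conjugate
-- ===== SOURCE A (Python) =====
-- def is_self_conjugate(parts):
--     m = len(parts)
--     conjugate = [0] * m
--     for i in range(m):
--         for j in range(m):
--             if parts[j] >= i + 1:
--                 conjugate[i] += 1
--     return parts == conjugate
-- ===== SOURCE B (Python) =====
-- def is_self_conjugate(parts):
--     m = len(parts)
--     diff = [0] * (m + 1)
--     for p in parts:
--         c = min(p, m)
--         if c > 0:
--             diff[0] += 1
--             diff[c] -= 1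
--     conjugate = []
--     run = 0
--     for i in range(m):
--         run += diff[i]
--         conjugate.append(run)
--     return parts == conjugate
-- ===== Notes on version B (the rewrite author's own statement) =====
-- stated objective: faster
-- what changed: Replaces the O(m^2) nested count loops with a difference array (part sizes clamped to m) and a single prefix-sum pass producing the conjugate in O(m).
import Mathlib
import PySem

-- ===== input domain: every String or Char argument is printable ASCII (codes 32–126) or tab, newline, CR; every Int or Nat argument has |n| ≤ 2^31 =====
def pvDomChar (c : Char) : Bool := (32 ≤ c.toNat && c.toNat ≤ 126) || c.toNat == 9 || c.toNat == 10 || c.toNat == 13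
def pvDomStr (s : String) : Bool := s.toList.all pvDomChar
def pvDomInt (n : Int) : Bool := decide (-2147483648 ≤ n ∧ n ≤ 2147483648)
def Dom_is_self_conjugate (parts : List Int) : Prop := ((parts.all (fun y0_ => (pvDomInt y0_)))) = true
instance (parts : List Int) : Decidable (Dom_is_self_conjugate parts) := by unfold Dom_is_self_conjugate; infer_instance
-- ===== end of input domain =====

-- B replaces A's O(m^2) nested count loops by a clamped difference array plus one
-- prefix-sum pass building the conjugate in O(m); return values agree on all inputs.

-- ===== PORT A =====
-- A: conjugate[i] = number of j with parts[j] >= i+1, via two nested loops; then parts == conjugate.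
def is_self_conjugate (parts : List Int) : Bool :=
  let m := parts.length
  let conjugate : List Int := List.replicate m 0
  let conjugate := (List.range m).foldl (fun conj (i : Nat) =>
      (List.range m).foldl (fun conj (j : Nat) =>
        if parts.getD j 0 ≥ (i : Int) + 1 then conj.set i (conj.getD i 0 + 1) else conj) conj)
    conjugate
  decide (parts = conjugate)

-- ===== PORT B =====
-- one step of B's first loop: clamp p to m, mark +1 at 0 and -1 at the clamp in the difference array
def bDiffStep (m : Nat) (d : List Int) (p : Int) : List Int :=
  if 0 < min p (m : Int) then
    (d.set 0 (d.getD 0 0 + 1)).set (min p (m : Int)).toNat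
      ((d.set 0 (d.getD 0 0 + 1)).getD (min p (m : Int)).toNat 0 - 1)
  else d

def is_self_conjugate_alt (parts : List Int) : Bool :=
  let m := parts.length
  let diff := parts.foldl (bDiffStep m) (List.replicate (m + 1) 0)
  let st := (List.range m).foldl (fun (acc : List Int × Int) i =>
      let run := acc.2 + diff.getD i 0
      (acc.1 ++ [run], run)) (([] : List Int), (0 : Int))
  decide (parts = st.1)

-- ===== PRECONDITION & SPEC =====
def Spec_is_self_conjugate (parts : List Int) (out : Bool) : Prop := out = is_self_conjugate_alt parts
instance (parts : List Int) (out : Bool) : Decidable (Spec_is_self_conjugate parts out) := by unfold Spec_is_self_conjugate; infer_instance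

-- ===== CLAIM (what is proved, stated in full; the proofs are below) =====
def Claim_equal_is_self_conjugate : Prop := ∀ (parts : List Int), Dom_is_self_conjugate parts → Spec_is_self_conjugate parts (is_self_conjugate parts)

-- ===== LEMMAS AND PROOFS =====

-- number of parts that are ≥ i+1 (the conjugate partition's i-th entry), as an Int
def cnt (parts : List Int) (i : Nat) : Int :=
  (parts.countP (fun p => decide ((i : Int) + 1 ≤ p)) : Int)

-- sum of the first k entries of d (getD with default 0)
def sumTo (d : List Int) : Nat → Int
  | 0 => 0
  | k + 1 => sumTo d k + d.getD k 0

theorem getD_set_lt {d : List Int} {a : Nat} (x : Int) (k : Nat) (ha : a < d.length) :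
    (d.set a x).getD k 0 = if a = k then x else d.getD k 0 := by
  simp only [List.getD_eq_getElem?_getD, List.getElem?_set]
  split_ifs with h1 h2 <;> simp_all

theorem set_getD_self {d : List Int} {a : Nat} (ha : a < d.length) :
    d.set a (d.getD a 0) = d := by
  have : d.getD a 0 = d[a] := by simp [List.getD_eq_getElem?_getD, List.getElem?_eq_getElem ha]
  rw [this, List.set_getElem_self]

theorem sumTo_set {d : List Int} {a : Nat} (x : Int) (ha : a < d.length) :
    ∀ k, sumTo (d.set a x) k = sumTo d k + (if a < k then x - d.getD a 0 else 0) := by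
  intro k
  induction k with
  | zero => simp [sumTo]
  | succ k ih =>
    simp only [sumTo, ih, getD_set_lt x k ha]
    rcases Nat.lt_trichotomy a k with h | h | h
    · rw [if_pos h, if_neg (by omega), if_pos (by omega)]; ring
    · subst h; rw [if_neg (by omega), if_pos rfl, if_pos (by omega)]; ring
    · rw [if_neg (by omega), if_neg (by omega), if_neg (by omega)]; ring

theorem getD_replicate_zero (n k : Nat) : (List.replicate n (0 : Int)).getD k 0 = 0 := by
  simp [List.getD_eq_getElem?_getD, List.getElem?_replicate]
  split <;> simp

-- ===== A-side: the nested loops compute the count =====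

theorem inner_fold_eq (q : Nat → Prop) [DecidablePred q] (i : Nat) :
    ∀ (L : List Nat) (c : List Int), i < c.length →
      L.foldl (fun conj j => if q j then conj.set i (conj.getD i 0 + 1) else conj) c
        = c.set i (c.getD i 0 + (L.countP (fun j => decide (q j)) : Int)) := by
  intro L
  induction L with
  | nil =>
    intro c hc
    simp only [List.foldl_nil, List.countP_nil, Nat.cast_zero, add_zero]
    exact (set_getD_self hc).symm
  | cons j L ih =>
    intro c hc
    simp only [List.foldl_cons, List.countP_cons]
    by_cases hq : q j
    · rw [if_pos hq, ih _ (by simpa using hc)]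
      rw [getD_set_lt _ i hc, if_pos rfl, List.set_set]
      congr 1
      simp only [hq, decide_true, if_pos]
      push_cast
      ring
    · rw [if_neg hq, ih _ hc]
      simp [hq]

theorem outerA_char (parts : List Int) :
    ∀ (n : Nat) (c : List Int), n ≤ c.length →
      ((List.range n).foldl (fun conj (i : Nat) =>
          (List.range parts.length).foldl (fun conj (j : Nat) =>
            if parts.getD j 0 ≥ (i : Int) + 1 then conj.set i (conj.getD i 0 + 1) else conj) conj) c).length
        = c.length ∧
      ∀ k, ((List.range n).foldl (fun conj (i : Nat) =>
          (List.range parts.length).foldl (fun conj (j : Nat) =>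
            if parts.getD j 0 ≥ (i : Int) + 1 then conj.set i (conj.getD i 0 + 1) else conj) conj) c).getD k 0
        = if k < n then c.getD k 0 + ((List.range parts.length).countP (fun j => decide ((k : Int) + 1 ≤ parts.getD j 0)) : Int)
          else c.getD k 0 := by
  intro n
  induction n with
  | zero => intro c _; simp
  | succ n ih =>
    intro c hc
    obtain ⟨ihlen, ihget⟩ := ih c (by omega)
    rw [List.range_succ]
    simp only [List.foldl_append, List.foldl_cons, List.foldl_nil]
    set r := (List.range n).foldl _ c with hr
    have hrlen : n < r.length := by rw [ihlen]; omega
    have step := inner_fold_eq (fun j => parts.getD j 0 ≥ (n : Int) + 1) n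
      (List.range parts.length) r hrlen
    simp only [ge_iff_le] at step ⊢
    rw [step]
    constructor
    · simp [ihlen]
    · intro k
      rw [getD_set_lt _ k hrlen]
      by_cases hkn : n = k
      · subst hkn
        rw [if_pos rfl, if_pos (by omega), ihget, if_neg (by omega)]
      · rw [if_neg hkn, ihget]
        by_cases h1 : k < n
        · rw [if_pos h1, if_pos (by omega)]
        · rw [if_neg h1, if_neg (by omega)]

-- the count over indices equals the count over elements
theorem countP_range_getD (parts : List Int) (i : Nat) :
    ((List.range parts.length).countP (fun j => decide ((i : Int) + 1 ≤ parts.getD j 0)) : Int)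
      = cnt parts i := by
  have hmap : (List.range parts.length).map (fun j => parts.getD j 0) = parts := by
    apply List.ext_getElem
    · simp
    · intro k h1 h2
      simp [List.getD_eq_getElem?_getD, List.getElem?_eq_getElem (by simpa using h2)]
  unfold cnt
  conv_rhs => rw [← hmap, List.countP_map]
  rfl

theorem conjA_eq (parts : List Int) :
    (List.range parts.length).foldl (fun conj (i : Nat) =>
        (List.range parts.length).foldl (fun conj (j : Nat) =>
          if parts.getD j 0 ≥ (i : Int) + 1 then conj.set i (conj.getD i 0 + 1) else conj) conj)
      (List.replicate parts.length 0)
      = (List.range parts.length).map (fun i => cnt parts i) := by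
  obtain ⟨hlen, hget⟩ := outerA_char parts parts.length (List.replicate parts.length 0) (by simp)
  apply List.ext_getElem
  · simpa using hlen
  · intro k h1 h2
    have hk : k < parts.length := by rw [hlen] at h1; simpa using h1
    have hthis := hget k
    rw [if_pos hk, getD_replicate_zero, countP_range_getD] at hthis
    simp only [List.getElem_map, List.getElem_range]
    rw [zero_add] at hthis
    rw [← hthis, List.getD_eq_getElem?_getD, List.getElem?_eq_getElem h1]
    rfl

-- ===== B-side: the difference array's prefix sums are the counts =====

theorem diffStep_sum (m : Nat) (d : List Int) (p : Int) (hd : d.length = m + 1)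
    {i : Nat} (hi : i < m) :
    sumTo (bDiffStep m d p) (i + 1) = sumTo d (i + 1) + (if (i : Int) + 1 ≤ p then 1 else 0) := by
  unfold bDiffStep
  have hle1 : min p (m : Int) ≤ p := min_le_left _ _
  have hle2 : min p (m : Int) ≤ (m : Int) := min_le_right _ _
  by_cases hc : 0 < min p (m : Int)
  · rw [if_pos hc]
    have hcm : (min p (m : Int)).toNat < d.length := by rw [hd]; omega
    have hcm' : (min p (m : Int)).toNat < (d.set 0 (d.getD 0 0 + 1)).length := by
      simpa using hcm
    have h0 : 0 < d.length := by omega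
    rw [sumTo_set _ hcm', sumTo_set _ h0]
    rw [getD_set_lt _ _ h0]
    have hne : (0 : Nat) ≠ (min p (m : Int)).toNat := by omega
    rw [if_neg hne]
    by_cases hp : (i : Int) + 1 ≤ p
    · have hge : (i : Int) + 1 ≤ min p (m : Int) := le_min hp (by omega)
      rw [if_pos (by omega), if_neg (by omega), if_pos hp]; ring
    · rw [if_pos (by omega), if_pos (by omega), if_neg hp]; ring
  · have hch := min_choice p ((m : Int))
    rw [if_neg hc, if_neg (by rcases hch with h | h <;> omega)]
    ring

theorem diff_fold_sum (m : Nat) :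
    ∀ (ps : List Int) (d : List Int), d.length = m + 1 → ∀ i, i < m →
      sumTo (ps.foldl (bDiffStep m) d) (i + 1)
        = sumTo d (i + 1) + (ps.countP (fun p => decide ((i : Int) + 1 ≤ p)) : Int) := by
  intro ps
  induction ps with
  | nil => intro d _ i _; simp
  | cons p ps ih =>
    intro d hd i hi
    simp only [List.foldl_cons, List.countP_cons]
    have hlen : (bDiffStep m d p).length = m + 1 := by
      unfold bDiffStep; split <;> simp [hd]
    rw [ih _ hlen i hi, diffStep_sum m d p hd hi]
    by_cases hp : (i : Int) + 1 ≤ p <;> simp [hp] <;> ring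

theorem sumTo_replicate_zero (n : Nat) : ∀ k, sumTo (List.replicate n (0 : Int)) k = 0 := by
  intro k
  induction k with
  | zero => rfl
  | succ k ih => simp [sumTo, ih, getD_replicate_zero]

theorem prefix_build (d : List Int) :
    ∀ (n : Nat),
      (List.range n).foldl (fun (acc : List Int × Int) i =>
          let run := acc.2 + d.getD i 0
          (acc.1 ++ [run], run)) (([] : List Int), (0 : Int))
        = ((List.range n).map (fun i => sumTo d (i + 1)), sumTo d n) := by
  intro n
  induction n with
  | zero => simp [sumTo]
  | succ n ih =>
    rw [List.range_succ, List.foldl_append, ih]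
    simp [List.range_succ, sumTo]

theorem conjB_eq (parts : List Int) :
    ((List.range parts.length).foldl (fun (acc : List Int × Int) i =>
        let run := acc.2 + (parts.foldl (bDiffStep parts.length) (List.replicate (parts.length + 1) 0)).getD i 0
        (acc.1 ++ [run], run)) (([] : List Int), (0 : Int))).1
      = (List.range parts.length).map (fun i => cnt parts i) := by
  rw [prefix_build]
  apply List.map_congr_left
  intro i hi
  have him : i < parts.length := by simpa using hi
  rw [diff_fold_sum parts.length parts _ (by simp) i him, sumTo_replicate_zero]
  simp [cnt]

-- ===== VERDICT (by name: the statement is the Claim_ definition above) =====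
theorem is_self_conjugate_spec : Claim_equal_is_self_conjugate := by
  intro parts _
  unfold Spec_is_self_conjugate is_self_conjugate is_self_conjugate_alt
  simp only []
  rw [conjA_eq parts, conjB_eq parts]
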